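-- pv_equiv track=rewrite | github.com/mdmuneerhasan/python | KNN/k.py | KNearestNiebhbour
-- ===== SOURCE A (Python) =====
-- C1=[[0,0],[1,1],[2,2],[-1,1],[1,2],[2,1],[3,3],[0,2],[1,3],[3,1],[1,1],[2,3],[2,2],[1,-1],[2,2],[3,1]]
--
-- C2=[[10,10],[9,9],[11,11],[11,12],[13,9],[10,10],[9,9],[11,13],[11,12],[13,9],[10,11],[9,8],[11,10],[11,9],[11,9]]
--
-- def KNearestNiebhbour(point,k=3):
--     dist=[]
--     for i in range(len(C1)):
--         d=((point[0]-C1[i][0])*(point[0]-C1[i][0])+(point[1]-C1[i][1])*(point[1]-C1[i][1]))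
--         dist.append([d,"c1"])
--
--     for i in range(len(C2)):
--         d=((point[0]-C2[i][0])*(point[0]-C2[i][0])+(point[1]-C2[i][1])*(point[1]-C2[i][1]))
--         dist.append([d,"c2"])
--
--     dist.sort()
--     c1=0
--     c2=0
--     for i in range(k):
--         if dist[i][1]=='c1':
--             c1+=1
--         else:
--             c2+=1
--
--     if c1>=c2:
--         return "C1 class"
--     else:
--         return "C2 class"
-- ===== SOURCE B (Python) =====
-- C1=[[0,0],[1,1],[2,2],[-1,1],[1,2],[2,1],[3,3],[0,2],[1,3],[3,1],[1,1],[2,3],[2,2],[1,-1],[2,2],[3,1]]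
--
-- C2=[[10,10],[9,9],[11,11],[11,12],[13,9],[10,10],[9,9],[11,13],[11,12],[13,9],[10,11],[9,8],[11,10],[11,9],[11,9]]
--
-- def KNearestNiebhbour(point, k=3):
--     # select the k nearest by repeated minimum extraction instead of sorting
--     x = point[0]
--     y = point[1]
--     pool = [((x - a) * (x - a) + (y - b) * (y - b), "c1") for a, b in C1]
--     pool += [((x - a) * (x - a) + (y - b) * (y - b), "c2") for a, b in C2]
--     c1 = 0
--     c2 = 0
--     for _ in range(k):
--         m = min(pool)          # lexicographic on (distance, label): ties break toward "c1"
--         pool.remove(m)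
--         if m[1] == "c1":
--             c1 += 1
--         else:
--             c2 += 1
--     return "C1 class" if c1 >= c2 else "C2 class"
-- ===== Notes on version B (the rewrite author's own statement) =====
-- stated objective: alternative
-- what changed: B never sorts: it builds the same (distance,label) pool with comprehensions and picks the k nearest by repeated lexicographic minimum extraction (min + remove), tallying labels as it goes.
import Mathlib
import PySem

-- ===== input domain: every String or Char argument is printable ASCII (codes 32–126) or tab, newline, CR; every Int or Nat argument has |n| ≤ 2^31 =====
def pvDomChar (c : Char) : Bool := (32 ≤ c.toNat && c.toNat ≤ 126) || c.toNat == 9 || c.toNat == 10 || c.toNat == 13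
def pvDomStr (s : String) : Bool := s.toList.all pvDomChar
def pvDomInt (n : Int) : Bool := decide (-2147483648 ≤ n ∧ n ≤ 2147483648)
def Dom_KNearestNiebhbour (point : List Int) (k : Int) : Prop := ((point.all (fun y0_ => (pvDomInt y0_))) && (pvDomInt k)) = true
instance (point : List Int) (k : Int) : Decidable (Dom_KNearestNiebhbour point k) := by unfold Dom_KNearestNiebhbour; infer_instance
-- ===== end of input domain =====

-- B replaces A's full sort of the 31 (distance,label) pairs by repeated lexicographic
-- minimum extraction of the k nearest (objective: alternative algorithm).

-- ===== PORT A =====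
-- module constants C1, C2 (fixed datasets of 2-d points)
def pvC1 : List (Int × Int) :=
  [(0,0),(1,1),(2,2),(-1,1),(1,2),(2,1),(3,3),(0,2),(1,3),(3,1),(1,1),(2,3),(2,2),(1,-1),(2,2),(3,1)]
def pvC2 : List (Int × Int) :=
  [(10,10),(9,9),(11,11),(11,12),(13,9),(10,10),(9,9),(11,13),(11,12),(13,9),(10,11),(9,8),(11,10),(11,9),(11,9)]

def KNearestNiebhbour (point : List Int) (k : Int) : String :=
  -- for i in range(len(C1)): dist.append([d, "c1"])
  let dist1 : List (Int × String) :=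
    (PySem.List.pyRange 0 (PySem.List.len pvC1)).foldl
      (fun acc i =>
        let c := PySem.List.pyGetD pvC1 i (0, 0)
        let p0 := PySem.List.pyGetD point 0 0
        let p1 := PySem.List.pyGetD point 1 0
        acc ++ [((p0 - c.1) * (p0 - c.1) + (p1 - c.2) * (p1 - c.2), "c1")]) []
  -- for i in range(len(C2)): dist.append([d, "c2"])
  let dist : List (Int × String) :=
    (PySem.List.pyRange 0 (PySem.List.len pvC2)).foldl
      (fun acc i =>
        let c := PySem.List.pyGetD pvC2 i (0, 0)
        let p0 := PySem.List.pyGetD point 0 0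
        let p1 := PySem.List.pyGetD point 1 0
        acc ++ [((p0 - c.1) * (p0 - c.1) + (p1 - c.2) * (p1 - c.2), "c2")]) dist1
  -- dist.sort()  (lexicographic on the [d, label] pairs)
  let sdist := PySem.List.sorted2 dist (fun p => p.1) (fun p => p.2) false
  -- for i in range(k): tally dist[i][1]
  let cc : Int × Int :=
    (PySem.List.pyRange 0 k).foldl
      (fun (cc : Int × Int) i =>
        if (PySem.List.pyGetD sdist i (0, "")).2 = "c1" then (cc.1 + 1, cc.2)
        else (cc.1, cc.2 + 1)) (0, 0)
  if cc.1 ≥ cc.2 then "C1 class" else "C2 class"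

-- ===== PORT B =====
def KNearestNiebhbour_alt (point : List Int) (k : Int) : String :=
  let x := PySem.List.pyGetD point 0 0
  let y := PySem.List.pyGetD point 1 0
  let pool : List (Int × String) :=
    pvC1.map (fun c => ((x - c.1) * (x - c.1) + (y - c.2) * (y - c.2), "c1"))
      ++ pvC2.map (fun c => ((x - c.1) * (x - c.1) + (y - c.2) * (y - c.2), "c2"))
  let st :=
    (PySem.List.pyRange 0 k).foldl
      (fun (st : List (Int × String) × Int × Int) _ =>
        match PySem.List.min2? st.1 (fun p => p.1) (fun p => p.2) with
        | none => st  -- Python raises ValueError here (empty pool); excluded by Pre_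
        | some m =>
          ((PySem.List.remove? st.1 m).getD st.1,
           if m.2 = "c1" then (st.2.1 + 1, st.2.2) else (st.2.1, st.2.2 + 1)))
      (pool, ((0 : Int), (0 : Int)))
  if st.2.1 ≥ st.2.2 then "C1 class" else "C2 class"

-- ===== PRECONDITION & SPEC =====
-- A raises IndexError when point has fewer than 2 coordinates (point[1]) or when
-- k exceeds the 31 stored samples (dist[i]); exactly those inputs are excluded.
def Pre_KNearestNiebhbour (point : List Int) (k : Int) : Prop :=
  2 ≤ point.length ∧ k ≤ 31
instance (point : List Int) (k : Int) : Decidable (Pre_KNearestNiebhbour point k) := by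
  unfold Pre_KNearestNiebhbour; infer_instance
def pvWitness_KNearestNiebhbour : List Int × Int := ([1, 2], 3)

def Spec_KNearestNiebhbour (point : List Int) (k : Int) (out : String) : Prop :=
  out = KNearestNiebhbour_alt point k
instance (point : List Int) (k : Int) (out : String) : Decidable (Spec_KNearestNiebhbour point k out) := by
  unfold Spec_KNearestNiebhbour; infer_instance

-- ===== CLAIM =====
def Claim_equal_KNearestNiebhbour : Prop :=
  ∀ (point : List Int) (k : Int), Dom_KNearestNiebhbour point k →
    Pre_KNearestNiebhbour point k →
    Spec_KNearestNiebhbour point k (KNearestNiebhbour point k)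

-- ===== LEMMAS AND PROOFS =====

-- the lexicographic order on (distance, label) pairs that Python's list comparison uses
def pvRle (a b : Int × String) : Prop := a.1 < b.1 ∨ (a.1 = b.1 ∧ a.2 ≤ b.2)

-- the Boolean strict comparison both sorted2 and min2? use (with fst/snd keys)
def pvLt (a b : Int × String) : Bool :=
  decide (a.1 < b.1) || (!decide (b.1 < a.1) && decide (a.2 < b.2))

lemma pvLt_true {a b : Int × String} (h : pvLt a b = true) : pvRle a b := by
  simp only [pvLt, Bool.or_eq_true, Bool.and_eq_true, Bool.not_eq_true',
    decide_eq_true_eq, decide_eq_false_iff_not] at h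
  rcases h with h | ⟨h1, h2⟩
  · exact Or.inl h
  · rcases lt_or_eq_of_le (not_lt.mp h1) with hlt | heq
    · exact Or.inl hlt
    · exact Or.inr ⟨heq, le_of_lt h2⟩

lemma pvLt_false {a b : Int × String} (h : pvLt a b = false) : pvRle b a := by
  rcases lt_trichotomy a.1 b.1 with h1 | h1 | h1
  · have hT : pvLt a b = true := by simp [pvLt, h1]
    rw [h] at hT; cases hT
  · by_cases h3 : a.2 < b.2
    · have hT : pvLt a b = true := by simp [pvLt, h1, h3]
      rw [h] at hT; cases hT
    · exact Or.inr ⟨h1.symm, not_lt.mp h3⟩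
  · exact Or.inl h1

lemma pvRle_refl (a : Int × String) : pvRle a a := Or.inr ⟨rfl, le_refl _⟩

lemma pvRle_trans {a b c : Int × String} (h1 : pvRle a b) (h2 : pvRle b c) : pvRle a c := by
  rcases h1 with h1 | ⟨h1, h1'⟩ <;> rcases h2 with h2 | ⟨h2, h2'⟩
  · exact Or.inl (lt_trans h1 h2)
  · exact Or.inl (h2 ▸ h1)
  · exact Or.inl (h1 ▸ h2)
  · exact Or.inr ⟨h1.trans h2, h1'.trans h2'⟩

lemma pvRle_antisymm {a b : Int × String} (h1 : pvRle a b) (h2 : pvRle b a) : a = b := by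
  rcases h1 with h1 | ⟨h1, h1'⟩ <;> rcases h2 with h2 | ⟨h2, h2'⟩ <;>
    [omega; omega; omega; exact Prod.ext h1 (le_antisymm h1' h2')]

-- min2?'s running-minimum loop, written structurally
def pvMinAux : Option (Int × String) → List (Int × String) → Option (Int × String)
  | acc, [] => acc
  | none, x :: t => pvMinAux (some x) t
  | some mm, x :: t => pvMinAux (if pvLt x mm then some x else some mm) t

lemma pvMin2_eq_aux : ∀ (l : List (Int × String)) (acc : Option (Int × String)),
    List.foldl
      (fun acc x => match acc with
        | none => some x
        | some m =>
          if (decide (x.1 < m.1) || (!decide (m.1 < x.1) && decide (x.2 < m.2))) = true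
          then some x else some m)
      acc l = pvMinAux acc l := by
  intro l
  induction l with
  | nil => intro acc; cases acc <;> rfl
  | cons x t ih =>
    intro acc
    cases acc with
    | none => rw [List.foldl_cons, ih]; rfl
    | some mm =>
      rw [List.foldl_cons, ih]
      rfl

lemma pvMin2_eq (l : List (Int × String)) :
    PySem.List.min2? l (fun p => p.1) (fun p => p.2) = pvMinAux none l := by
  rw [← pvMin2_eq_aux l none]
  unfold PySem.List.min2?
  apply List.foldl_ext
  intro acc b _
  cases acc <;> rfl

-- the running minimum from `some a` over t is a member of a :: t and a lower bound for it
lemma pvMinFold : ∀ (t : List (Int × String)) (a : Int × String),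
    ∃ m, pvMinAux (some a) t = some m ∧ m ∈ a :: t ∧ ∀ y ∈ a :: t, pvRle m y := by
  intro t
  induction t with
  | nil =>
    intro a
    refine ⟨a, rfl, List.mem_singleton.mpr rfl, ?_⟩
    intro y hy; rcases List.mem_singleton.mp hy with rfl; exact pvRle_refl _
  | cons x t ih =>
    intro a
    by_cases hx : pvLt x a = true
    · obtain ⟨m, hm, hmem, hmin⟩ := ih x
      refine ⟨m, by simp [pvMinAux, hx]; exact hm, ?_, ?_⟩
      · rcases List.mem_cons.mp hmem with rfl | h
        · exact List.mem_cons_of_mem _ List.mem_cons_self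
        · exact List.mem_cons_of_mem _ (List.mem_cons_of_mem _ h)
      · intro y hy
        rcases List.mem_cons.mp hy with rfl | hy
        · exact pvRle_trans (hmin x List.mem_cons_self) (pvLt_true hx)
        · exact hmin y hy
    · obtain ⟨m, hm, hmem, hmin⟩ := ih a
      refine ⟨m, by simp [pvMinAux, hx]; exact hm, ?_, ?_⟩
      · rcases List.mem_cons.mp hmem with rfl | h
        · exact List.mem_cons_self
        · exact List.mem_cons_of_mem _ (List.mem_cons_of_mem _ h)
      · intro y hy
        rcases List.mem_cons.mp hy with rfl | hy
        · exact hmin y List.mem_cons_self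
        · rcases List.mem_cons.mp hy with rfl | hy
          · exact pvRle_trans (hmin a List.mem_cons_self) (pvLt_false (eq_false_of_ne_true hx))
          · exact hmin y (List.mem_cons_of_mem _ hy)

lemma pvMin2_spec {l : List (Int × String)} (h : l ≠ []) :
    ∃ m, PySem.List.min2? l (fun p => p.1) (fun p => p.2) = some m ∧ m ∈ l ∧
      ∀ y ∈ l, pvRle m y := by
  cases l with
  | nil => exact absurd rfl h
  | cons a t =>
    obtain ⟨m, hm, hmem, hmin⟩ := pvMinFold t a
    exact ⟨m, by rw [pvMin2_eq]; exact hm, hmem, hmin⟩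

-- insertBy with pvLt preserves pvRle-pairwise-ness
lemma pvInsert_pairwise {x : Int × String} : ∀ {acc : List (Int × String)},
    acc.Pairwise pvRle → (PySem.List.insertBy pvLt x acc).Pairwise pvRle := by
  intro acc
  induction acc with
  | nil => intro _; simp [PySem.List.insertBy]
  | cons y ys ih =>
    intro hp
    rw [List.pairwise_cons] at hp
    by_cases hxy : pvLt x y = true
    · rw [PySem.List.insertBy, if_pos hxy]
      refine List.pairwise_cons.mpr ⟨?_, List.pairwise_cons.mpr hp⟩
      intro z hz
      rcases List.mem_cons.mp hz with rfl | hz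
      · exact pvLt_true hxy
      · exact pvRle_trans (pvLt_true hxy) (hp.1 z hz)
    · rw [PySem.List.insertBy, if_neg hxy]
      refine List.pairwise_cons.mpr ⟨?_, ih hp.2⟩
      intro z hz
      rcases (PySem.List.mem_insertBy _ _ _ _).mp hz with rfl | hz
      · exact pvLt_false (eq_false_of_ne_true hxy)
      · exact hp.1 z hz

lemma pvSortedFold_pairwise : ∀ (l acc : List (Int × String)), acc.Pairwise pvRle →
    (List.foldl (fun acc x => PySem.List.insertBy pvLt x acc) acc l).Pairwise pvRle := by
  intro l
  induction l with
  | nil => intro acc h; exact h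
  | cons x t ih => intro acc h; exact ih _ (pvInsert_pairwise h)

lemma pvSorted2_pairwise (l : List (Int × String)) :
    (PySem.List.sorted2 l (fun p => p.1) (fun p => p.2) false).Pairwise pvRle :=
  pvSortedFold_pairwise l [] List.Pairwise.nil

-- the head of the sorted list is the lexicographic minimum, and the tail sorts the rest
lemma pvCore {l : List (Int × String)} {m : Int × String}
    (hm : PySem.List.min2? l (fun p => p.1) (fun p => p.2) = some m) :
    PySem.List.sorted2 l (fun p => p.1) (fun p => p.2) false
      = m :: PySem.List.sorted2 (l.erase m) (fun p => p.1) (fun p => p.2) false := by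
  have hne : l ≠ [] := by
    rintro rfl
    rw [pvMin2_eq] at hm
    cases hm
  obtain ⟨m', hm', hmem, hmin⟩ := pvMin2_spec hne
  rw [hm] at hm'
  obtain rfl : m = m' := Option.some.inj hm'
  apply List.eq_of_perm_of_sorted (le := pvRle)
  · intro a b _ _ h1 h2; exact pvRle_antisymm h1 h2
  · exact pvSorted2_pairwise l
  · refine List.pairwise_cons.mpr ⟨?_, pvSorted2_pairwise _⟩
    intro y hy
    have : y ∈ l.erase m := (PySem.List.sorted2_perm _ _ _ _).mem_iff.mp hy
    exact hmin y (List.mem_of_mem_erase this)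
  · exact (PySem.List.sorted2_perm _ _ _ _).trans
      ((List.perm_cons_erase hmem).trans
        (List.Perm.cons m (PySem.List.sorted2_perm _ _ _ _).symm))

-- the tally step shared by both ports
def pvStep (cc : Int × Int) (m : Int × String) : Int × Int :=
  if m.2 = "c1" then (cc.1 + 1, cc.2) else (cc.1, cc.2 + 1)

-- B's loop body as a function of the state
def pvG : List (Int × String) × Int × Int → List (Int × String) × Int × Int :=
  fun st =>
    match PySem.List.min2? st.1 (fun p => p.1) (fun p => p.2) with
    | none => st
    | some m => ((PySem.List.remove? st.1 m).getD st.1, pvStep st.2 m)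

-- a fold that ignores the list elements is an iterate
lemma pvFoldl_const {σ α : Type} (g : σ → σ) : ∀ (l : List α) (init : σ),
    List.foldl (fun s _ => g s) init l = g^[l.length] init := by
  intro l
  induction l with
  | nil => intro init; rfl
  | cons z t ih => intro init; simp [List.foldl_cons, ih, Function.iterate_succ_apply]

-- indexing fold over range n = fold over the n-prefix
lemma pvFoldl_range_getD {β : Type} (f : β → (Int × String) → β) (d : Int × String) :
    ∀ (n : Nat) (xs : List (Int × String)) (init : β), n ≤ xs.length →
      List.foldl (fun acc j => f acc (xs.getD j d)) init (List.range n)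
        = List.foldl f init (xs.take n) := by
  intro n
  induction n with
  | zero => intro xs init _; rfl
  | succ n ih =>
    intro xs init h
    have hlt : n < xs.length := h
    rw [List.range_succ, List.foldl_append, ih xs init (by omega)]
    have ht : xs.take (n + 1) = xs.take n ++ [xs[n]] := by
      rw [List.take_succ, List.getElem?_eq_getElem hlt]
      rfl
    rw [ht, List.foldl_append]
    simp [List.getD_eq_getElem?_getD, List.getElem?_eq_getElem hlt]

-- MAIN: k-fold minimum extraction tallies exactly the k-prefix of the sorted list
lemma pvMain : ∀ (n : Nat) (l : List (Int × String)) (c : Int × Int), n ≤ l.length →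
    (pvG^[n] (l, c)).2
      = List.foldl pvStep c ((PySem.List.sorted2 l (fun p => p.1) (fun p => p.2) false).take n) := by
  intro n
  induction n with
  | zero => intro l c _; rfl
  | succ n ih =>
    intro l c h
    have hne : l ≠ [] := by rintro rfl; simp at h
    obtain ⟨m, hm, hmem, _⟩ := pvMin2_spec hne
    have hrm : PySem.List.remove? l m = some (l.erase m) :=
      PySem.List.remove?_eq_some_erase l m hmem
    have hg : pvG (l, c) = (l.erase m, pvStep c m) := by
      simp [pvG, hm, hrm]
    rw [Function.iterate_succ_apply, hg, ih _ _ (by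
      rw [List.length_erase_of_mem hmem]; omega)]
    rw [pvCore hm, List.take_succ_cons, List.foldl_cons]

-- pyRange 0 k is empty for k ≤ 0
lemma pvPyRange_nonpos {k : Int} (h : k ≤ 0) : PySem.List.pyRange 0 k = [] := by
  have h0 : ¬ (0 : Int) < k := by omega
  simp [PySem.List.pyRange, h0]

-- turning A's index-building loops into maps over the datasets
lemma pvMapC (xs : List (Int × Int)) (x y : Int) (s : String) :
    List.map
      (fun i =>
        ((x - (PySem.List.pyGetD xs i ((0 : Int), (0 : Int))).1)
            * (x - (PySem.List.pyGetD xs i ((0 : Int), (0 : Int))).1)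
          + (y - (PySem.List.pyGetD xs i ((0 : Int), (0 : Int))).2)
            * (y - (PySem.List.pyGetD xs i ((0 : Int), (0 : Int))).2), s))
      (PySem.List.pyRange 0 (PySem.List.len xs))
    = xs.map (fun c => ((x - c.1) * (x - c.1) + (y - c.2) * (y - c.2), s)) := by
  conv_rhs => rw [← PySem.List.map_pyGetD_pyRange_zero xs ((0 : Int), (0 : Int))]
  rw [List.map_map]
  rfl

-- ===== VERDICT =====
theorem KNearestNiebhbour_spec : Claim_equal_KNearestNiebhbour := by
  intro point k _ hPre
  unfold Spec_KNearestNiebhbour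
  simp only [KNearestNiebhbour, KNearestNiebhbour_alt,
    PySem.List.foldl_append_singleton_eq_map, List.nil_append]
  set x := PySem.List.pyGetD point 0 0 with hx
  set y := PySem.List.pyGetD point 1 0 with hy
  rw [pvMapC pvC1 x y "c1", pvMapC pvC2 x y "c2"]
  set L := pvC1.map (fun c => ((x - c.1) * (x - c.1) + (y - c.2) * (y - c.2), "c1"))
      ++ pvC2.map (fun c => ((x - c.1) * (x - c.1) + (y - c.2) * (y - c.2), "c2")) with hL
  have hLlen : L.length = 31 := by rw [hL]; simp [pvC1, pvC2]
  by_cases hk : k ≤ 0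
  · rw [pvPyRange_nonpos hk]
    rfl
  · obtain ⟨n, rfl⟩ : ∃ n : Nat, k = (n : Int) :=
      ⟨k.toNat, (Int.toNat_of_nonneg (by omega)).symm⟩
    have hn : n ≤ 31 := by exact_mod_cast hPre.2
    set S := PySem.List.sorted2 L (fun p => p.1) (fun p => p.2) false with hS
    have hSlen : S.length = 31 := by
      rw [hS, (PySem.List.sorted2_perm _ _ _ _).length_eq, hLlen]
    -- B side: the fold ignores its index, so it is an iterate of pvG
    have hbodyB :
        (fun (st : List (Int × String) × Int × Int) (_ : Int) =>
          match PySem.List.min2? st.1 (fun p => p.1) (fun p => p.2) with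
          | none => st
          | some m =>
            ((PySem.List.remove? st.1 m).getD st.1,
             if m.2 = "c1" then (st.2.1 + 1, st.2.2) else (st.2.1, st.2.2 + 1)))
        = (fun st _ => pvG st) := by
      funext st i
      cases hmm : PySem.List.min2? st.1 (fun p => p.1) (fun p => p.2) with
      | none => simp [pvG, hmm]
      | some m => simp [pvG, pvStep, hmm]
    rw [hbodyB, pvFoldl_const pvG]
    have hlen : (PySem.List.pyRange 0 ((n : Nat) : Int)).length = n := by
      rw [PySem.List.pyRange_zero_natCast, List.length_map, List.length_range]
    rw [hlen]
    -- A side: the indexed fold over the sorted list is the fold over its n-prefix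
    have hA : (PySem.List.pyRange 0 ((n : Nat) : Int)).foldl
        (fun (cc : Int × Int) i =>
          if (PySem.List.pyGetD S i ((0 : Int), "")).2 = "c1" then (cc.1 + 1, cc.2)
          else (cc.1, cc.2 + 1)) ((0 : Int), (0 : Int))
        = List.foldl pvStep ((0 : Int), (0 : Int)) (S.take n) := by
      rw [PySem.List.pyRange_zero_natCast, List.foldl_map]
      have hbodyA : (fun (cc : Int × Int) (j : Nat) =>
          if (PySem.List.pyGetD S ((j : Nat) : Int) ((0 : Int), "")).2 = "c1"
          then (cc.1 + 1, cc.2) else (cc.1, cc.2 + 1))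
          = (fun (cc : Int × Int) (j : Nat) => pvStep cc (S.getD j ((0 : Int), ""))) := by
        funext cc j
        rw [PySem.List.pyGetD_natCast]
        rfl
      rw [hbodyA]
      exact pvFoldl_range_getD pvStep ((0 : Int), "") n S ((0 : Int), (0 : Int)) (by omega)
    rw [hA, pvMain n L ((0 : Int), (0 : Int)) (by omega), hS]
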